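-- pv_equiv track=rewrite | github.com/NobuyukiInoue/LeetCode | Problems/0506_Relative_Ranks/Relative_Ranks.py | findRelativeRanks_work
-- ===== SOURCE A (Python) =====
-- def findRelativeRanks_work(nums):
--     """
--     :type nums: List[int]
--     :rtype: List[str]
--     """
--     if len(nums) <= 0:
--         return []
--     '''
--     sorted_nums = nums[:]
--     sorted_nums.sort(reverse = True)
--     '''
--     sorted_nums = sorted(nums, reverse = True)
--     results = [""]*len(nums)
--     for n in range(len(results)):
--         for i in range(len(sorted_nums)):
--             if nums[n] == sorted_nums[i]:
--                 if i == 0: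
--                     results[n] = "Gold Medal"
--                 elif i == 1:
--                     results[n] = "Silver Medal"
--                 elif i == 2:
--                     results[n] = "Bronze Medal"
--                 else:
--                     results[n] = str(i + 1)
--     return results
-- ===== SOURCE B (Python) =====
-- def findRelativeRanks_work(nums):
--     # rank of v = number of scores >= v (no sorting; rank computed by counting)
--     results = []
--     for v in nums:
--         ge = 0
--         for u in nums:
--             if u >= v:
--                 ge += 1
--         if ge == 1:
--             results.append("Gold Medal")
--         elif ge == 2:
--             results.append("Silver Medal")
--         elif ge == 3:
--             results.append("Bronze Medal")
--         else:
--             results.append(str(ge))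
--     return results
-- ===== Notes on version B (the rewrite author's own statement) =====
-- stated objective: alternative
-- what changed: B never sorts and never looks up positions in a sorted list: the rank of each score v is computed arithmetically as the count of scores >= v (which equals 1 + the last index of v in descending order), then labelled directly.
import Mathlib
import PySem

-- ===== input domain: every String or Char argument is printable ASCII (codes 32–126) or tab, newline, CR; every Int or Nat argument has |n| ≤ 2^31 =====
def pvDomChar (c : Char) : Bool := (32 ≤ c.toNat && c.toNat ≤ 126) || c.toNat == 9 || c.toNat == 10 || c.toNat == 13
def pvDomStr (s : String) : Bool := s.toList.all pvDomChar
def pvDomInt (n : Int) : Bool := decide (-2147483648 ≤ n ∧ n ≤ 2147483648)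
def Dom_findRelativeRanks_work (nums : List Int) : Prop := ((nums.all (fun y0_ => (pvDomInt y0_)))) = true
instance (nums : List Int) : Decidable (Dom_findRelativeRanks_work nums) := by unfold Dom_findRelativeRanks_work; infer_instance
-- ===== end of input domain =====

-- B computes each rank arithmetically as the count of scores >= v (no sorting, no positional lookup); same O(n^2) cost, a genuinely different algorithm.


-- ===== PORT A =====
def findRelativeRanks_work (nums : List Int) : List String :=
  if nums.length ≤ 0 then []
  else
    let sorted_nums := PySem.List.sorted nums (fun x => x) true
    let results := List.replicate nums.length ""
    (List.range results.length).foldl (fun results n =>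
      (List.range sorted_nums.length).foldl (fun results i =>
        if nums.getD n 0 = sorted_nums.getD i 0 then
          results.set n
            (if i = 0 then "Gold Medal"
             else if i = 1 then "Silver Medal"
             else if i = 2 then "Bronze Medal"
             else PySem.Int.toStr ((i : Int) + 1))
        else results) results) results

-- ===== PORT B =====
def findRelativeRanks_work_alt (nums : List Int) : List String :=
  nums.foldl (fun results v =>
    let ge : Int := nums.foldl (fun c u => if v ≤ u then c + 1 else c) 0
    results ++ [if ge = 1 then "Gold Medal"
                else if ge = 2 then "Silver Medal"
                else if ge = 3 then "Bronze Medal"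
                else PySem.Int.toStr ge]) []

-- ===== PRECONDITION & SPEC =====
def Spec_findRelativeRanks_work (nums : List Int) (out : List String) : Prop := out = findRelativeRanks_work_alt nums
instance (nums : List Int) (out : List String) : Decidable (Spec_findRelativeRanks_work nums out) := by unfold Spec_findRelativeRanks_work; infer_instance

-- ===== CLAIM (what is proved, stated in full; the proofs are below) =====
def Claim_equal_findRelativeRanks_work : Prop := ∀ (nums : List Int), Dom_findRelativeRanks_work nums → Spec_findRelativeRanks_work nums (findRelativeRanks_work nums)

-- ===== LEMMAS AND PROOFS =====

-- A's inner-loop label for sorted position i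
def pvLabel (i : Int) : String :=
  if i = 0 then "Gold Medal"
  else if i = 1 then "Silver Medal"
  else if i = 2 then "Bronze Medal"
  else PySem.Int.toStr (i + 1)

-- index (as Int) of the LAST occurrence of v in s, if any
def pvLastHit (s : List Int) (v : Int) : Option Int :=
  match s with
  | [] => none
  | x :: t =>
    match pvLastHit t v with
    | some i => some (i + 1)
    | none => if x = v then some 0 else none

lemma pvLastHit_append_singleton (s : List Int) (x v : Int) :
    pvLastHit (s ++ [x]) v = if x = v then some (s.length : Int) else pvLastHit s v := by
  induction s with
  | nil => simp [pvLastHit]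
  | cons y t ih =>
    simp only [List.cons_append, pvLastHit, ih]
    by_cases hx : x = v <;> simp [hx]

lemma pvLastHit_eq_none_of_not_mem (s : List Int) (v : Int) (h : v ∉ s) :
    pvLastHit s v = none := by
  induction s with
  | nil => rfl
  | cons x t ih =>
    have hx : ¬ (x = v) := fun hh => h (by simp [hh])
    have ht : v ∉ t := fun hh => h (List.mem_cons_of_mem _ hh)
    simp [pvLastHit, ih ht, hx]

-- the value A computes for an element v, via the sorted list s
def pvRankOf (s : List Int) (v : Int) : String :=
  match pvLastHit s v with
  | some i => pvLabel i
  | none => ""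

-- in a descending-sorted list, the last index of v is (#elements ≥ v) − 1
lemma lastHit_eq_countP (s : List Int) (hs : s.Pairwise (fun a b => b ≤ a)) (v : Int)
    (hv : v ∈ s) :
    pvLastHit s v = some ((s.countP (fun u => decide (v ≤ u)) : Int) - 1) := by
  induction s with
  | nil => cases hv
  | cons x t ih =>
    rcases List.pairwise_cons.mp hs with ⟨hx, ht⟩
    by_cases hvt : v ∈ t
    · have hxv : v ≤ x := hx v hvt
      rw [pvLastHit, ih ht hvt]
      simp only [List.countP_cons, hxv, decide_true, if_true]
      congr 1
      push_cast
      ring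
    · have hvx : v = x := by
        rcases List.mem_cons.mp hv with h | h
        · exact h
        · exact absurd h hvt
      have hzero : t.countP (fun u => decide (v ≤ u)) = 0 := by
        apply List.countP_eq_zero.mpr
        intro u hu
        have h1 : u ≤ x := hx u hu
        have h2 : u ≠ v := fun hh => hvt (hh ▸ hu)
        simp only [decide_eq_true_eq]
        intro hvu
        exact h2 (le_antisymm (hvx ▸ h1) hvu)
      rw [pvLastHit, pvLastHit_eq_none_of_not_mem t v hvt, if_pos hvx.symm]
      simp [List.countP_cons, ← hvx, hzero]

-- A's inner loop (over a prefix of the sorted list) realises pvRankOf via set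
lemma innerA (s : List Int) (v : Int) (n : Nat) (m : Nat) (hm : m ≤ s.length) (res : List String) :
    (List.range m).foldl (fun results i =>
        if v = s.getD i 0 then
          results.set n
            (if i = 0 then "Gold Medal"
             else if i = 1 then "Silver Medal"
             else if i = 2 then "Bronze Medal"
             else PySem.Int.toStr ((i : Int) + 1))
        else results) res
      = match pvLastHit (s.take m) v with
        | some i => res.set n (pvLabel i)
        | none => res := by
  induction m with
  | zero => simp [pvLastHit]
  | succ m ih =>
    have hm' : m ≤ s.length := Nat.le_of_succ_le hm
    have hlt : m < s.length := hm
    rw [List.range_succ, List.foldl_append, ih hm']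
    have htake : s.take (m + 1) = s.take m ++ [s[m]] := by
      rw [List.take_add_one]
      simp [List.getElem?_eq_getElem hlt]
    rw [htake, pvLastHit_append_singleton]
    have hget : s.getD m 0 = s[m] := List.getD_eq_getElem s 0 hlt
    have hlen : (s.take m).length = m := by simp [hm']
    simp only [List.foldl_cons, List.foldl_nil]
    by_cases hv : v = s.getD m 0
    · have hx : s[m] = v := by rw [← hget, hv]
      rw [if_pos hv, if_pos hx, hlen]
      have hlab : (if m = 0 then "Gold Medal"
             else if m = 1 then "Silver Medal"
             else if m = 2 then "Bronze Medal"
             else PySem.Int.toStr ((m : Int) + 1)) = pvLabel (m : Int) := by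
        unfold pvLabel
        split_ifs with h1 h2 h3 h4 h5 h6 h7 h8 h9 <;> first | rfl | (exfalso; omega)
      rw [hlab]
      cases pvLastHit (s.take m) v
      · rfl
      · exact List.set_set ..
    · have hx : ¬ (s[m] = v) := by rw [← hget]; exact fun hh => hv hh.symm
      rw [if_neg hv, if_neg hx]

-- A's outer loop over range m builds the mapped prefix, leaving the replicate tail
lemma outerA (nums s : List Int) (m : Nat) (hm : m ≤ nums.length) :
    (List.range m).foldl (fun results n =>
        match pvLastHit s (nums.getD n 0) with
        | some i => results.set n (pvLabel i)
        | none => results) (List.replicate nums.length "")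
      = (List.range m).map (fun n => pvRankOf s (nums.getD n 0))
          ++ List.replicate (nums.length - m) "" := by
  induction m with
  | zero => simp
  | succ m ih =>
    have hm' : m ≤ nums.length := Nat.le_of_succ_le hm
    rw [List.range_succ, List.foldl_append, ih hm']
    simp only [List.foldl_cons, List.foldl_nil, List.map_append, List.map_cons, List.map_nil]
    have hrep : List.replicate (nums.length - m) "" = "" :: List.replicate (nums.length - (m+1)) "" := by
      have : nums.length - m = (nums.length - (m+1)) + 1 := by omega
      rw [this, List.replicate_succ]
    have hlen : ((List.range m).map (fun n => pvRankOf s (nums.getD n 0))).length = m := by simp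
    rw [hrep]
    cases h : pvLastHit s (nums.getD m 0) with
    | some i =>
      have hr : pvRankOf s (nums.getD m 0) = pvLabel i := by rw [pvRankOf, h]
      simp only [hr]
      rw [List.set_append_right _ _ hlen.le, hlen, Nat.sub_self]
      simp
    | none =>
      have hr : pvRankOf s (nums.getD m 0) = "" := by rw [pvRankOf, h]
      simp only [hr]
      simp

lemma map_range_getD (nums : List Int) (f : Int → String) :
    (List.range nums.length).map (fun n => f (nums.getD n 0)) = nums.map f := by
  apply List.ext_getElem
  · simp
  · intro i h1 h2
    have hi : i < nums.length := by simpa using h2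
    simp [List.getD_eq_getElem?_getD, List.getElem?_eq_getElem hi]

-- B's inner counting loop is countP
lemma countLoop_eq_countP (nums : List Int) (v : Int) :
    nums.foldl (fun c u => if v ≤ u then c + 1 else c) (0 : Int)
      = (nums.countP (fun u => decide (v ≤ u)) : Int) := by
  suffices h : ∀ (c : Int), nums.foldl (fun c u => if v ≤ u then c + 1 else c) c
      = c + (nums.countP (fun u => decide (v ≤ u)) : Int) by
    simpa using h 0
  induction nums with
  | nil => intro c; simp
  | cons x t ih =>
    intro c
    by_cases hx : v ≤ x <;> simp [List.countP_cons, hx, ih] <;> push_cast <;> ring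

-- B's outer append loop is a map
lemma altB_eq_map (nums : List Int) :
    findRelativeRanks_work_alt nums
      = nums.map (fun v =>
          let ge : Int := (nums.countP (fun u => decide (v ≤ u)) : Int)
          if ge = 1 then "Gold Medal"
          else if ge = 2 then "Silver Medal"
          else if ge = 3 then "Bronze Medal"
          else PySem.Int.toStr ge) := by
  unfold findRelativeRanks_work_alt
  simp only [countLoop_eq_countP]
  exact PySem.List.foldl_append_singleton_eq_map ..

-- ===== VERDICT (by name: the statement is the Claim_ definition above) =====
theorem findRelativeRanks_work_spec : Claim_equal_findRelativeRanks_work := by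
  intro nums _
  unfold Spec_findRelativeRanks_work
  rw [altB_eq_map]
  unfold findRelativeRanks_work
  set s := PySem.List.sorted nums (fun x => x) true with hs
  by_cases hnil : nums.length ≤ 0
  · have : nums = [] := List.eq_nil_of_length_eq_zero (by omega)
    simp [this]
  · simp only [if_neg hnil]
    have hperm : s.Perm nums := PySem.List.sorted_perm ..
    have hslen : s.length = nums.length := hperm.length_eq
    have hpw : s.Pairwise (fun a b => b ≤ a) := by
      have := PySem.List.sorted_pairwise_rev (xs := nums) (key := fun x => x)
      simpa using this
    have hinner : ∀ (res : List String) (n : Nat),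
        (List.range s.length).foldl (fun results i =>
          if nums.getD n 0 = s.getD i 0 then
            results.set n
              (if i = 0 then "Gold Medal"
               else if i = 1 then "Silver Medal"
               else if i = 2 then "Bronze Medal"
               else PySem.Int.toStr ((i : Int) + 1))
          else results) res
        = match pvLastHit s (nums.getD n 0) with
          | some i => res.set n (pvLabel i)
          | none => res := by
      intro res n
      have := innerA s (nums.getD n 0) n s.length le_rfl res
      simpa using this
    have hfun : (fun (results : List String) (n : Nat) =>
        (List.range s.length).foldl (fun results i =>
          if nums.getD n 0 = s.getD i 0 then
            results.set n
              (if i = 0 then "Gold Medal"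
               else if i = 1 then "Silver Medal"
               else if i = 2 then "Bronze Medal"
               else PySem.Int.toStr ((i : Int) + 1))
          else results) results)
        = (fun (results : List String) (n : Nat) =>
            match pvLastHit s (nums.getD n 0) with
            | some i => results.set n (pvLabel i)
            | none => results) :=
      funext fun res => funext fun n => hinner res n
    rw [List.length_replicate, hfun, outerA nums s nums.length le_rfl, Nat.sub_self,
      List.replicate_zero, List.append_nil, map_range_getD nums (fun v => pvRankOf s v)]
    apply List.map_congr_left
    intro v hv
    have hvs : v ∈ s := hperm.mem_iff.mpr hv
    have hcount : s.countP (fun u => decide (v ≤ u)) = nums.countP (fun u => decide (v ≤ u)) :=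
      hperm.countP_eq _
    have hpos : 0 < nums.countP (fun u => decide (v ≤ u)) :=
      List.countP_pos_iff.mpr ⟨v, hv, by simp⟩
    rw [pvRankOf, lastHit_eq_countP s hpw v hvs, hcount]
    set c : Int := (nums.countP (fun u => decide (v ≤ u)) : Int) with hc
    have hc1 : 1 ≤ c := by rw [hc]; exact_mod_cast hpos
    show pvLabel (c - 1) = _
    unfold pvLabel
    have h4 : c - 1 + 1 = c := by ring
    split_ifs <;> first | rfl | (exfalso; omega) | (rw [h4])
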